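-- pv_equiv track=rewrite | github.com/Bobcatsoap/jy-server | cell/RoomType6InitiativeCardSplit.py | find_l_d
-- ===== SOURCE A (Python) =====
-- def find_l_d(cards):
--     """
--     找最长连对
--     :param cards:
--     :return:
--     """
--     _2 = []
--     _2_l_d_s = []
--     _cards = cards.copy()
--     for i in _cards:
--         if _cards.count(i) >= 2:
--             if i not in _2:
--                 _2.append(i)
--     _2.sort()
--
--     for i in _2:
--         num = i
--         _2_l_d = []
--         while num in _2 and num < 15:
--             _2_l_d.append(num)
--             num += 1
--
--         if len(_2_l_d) >= 3:
--             _2_l_d_s.append(_2_l_d)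
--
--     t = []
--     if _2_l_d_s:
--         _2_l_d_s.sort(key=lambda x: len(x), reverse=True)
--         t = _2_l_d_s[0] * 2
--         t.sort()
--     return [t]
-- ===== SOURCE B (Python) =====
-- def find_l_d(cards):
--     counts = {}
--     for c in cards:
--         counts[c] = counts.get(c, 0) + 1
--     s = sorted(v for v, n in counts.items() if n >= 2 and v < 15)
--     best = []
--     cur = []
--     for v in s:
--         cur = cur + [v] if cur and cur[-1] == v - 1 else [v]
--         if len(cur) >= 3 and len(cur) > len(best):
--             best = cur
--     return [[x for x in best for _ in range(2)]]
-- ===== Notes on version B (the rewrite author's own statement) =====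
-- stated objective: faster
-- what changed: Replace A's repeated list.count/membership scans and per-start while-loop run rebuilding plus a length sort with a dict count pass and one linear scan over the sorted duplicated values that tracks the current run and the first longest run directly.
import Mathlib
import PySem

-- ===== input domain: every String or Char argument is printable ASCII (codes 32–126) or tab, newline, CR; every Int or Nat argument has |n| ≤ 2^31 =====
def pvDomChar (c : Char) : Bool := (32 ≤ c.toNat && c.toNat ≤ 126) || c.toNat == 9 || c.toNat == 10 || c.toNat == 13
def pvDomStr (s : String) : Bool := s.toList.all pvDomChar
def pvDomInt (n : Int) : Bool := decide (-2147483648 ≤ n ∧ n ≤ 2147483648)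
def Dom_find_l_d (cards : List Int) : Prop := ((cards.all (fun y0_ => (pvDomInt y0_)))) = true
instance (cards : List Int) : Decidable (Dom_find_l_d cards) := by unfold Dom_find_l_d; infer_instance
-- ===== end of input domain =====

-- B replaces A's quadratic count/membership rescans and per-start while-loops by one dict
-- counting pass and a single linear scan of the sorted duplicated values (objective: faster).

-- ===== PORT A =====
-- the inner `while num in _2 and num < 15` loop of A
def runW (s : List Int) (num : Int) : List Int :=
  if h : num ∈ s ∧ num < 15 then num :: runW s (num + 1) else []
termination_by (15 - num).toNat
decreasing_by omega

def find_l_d (cards : List Int) : List (List Int) :=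
  let t2 := cards.foldl (fun acc i =>
      if 2 ≤ PySem.List.count cards i then (if i ∉ acc then acc ++ [i] else acc) else acc) []
  let t2s := PySem.List.sorted t2 (fun x => x) false
  let runs := t2s.foldl (fun acc i =>
      let r := runW t2s i
      if 3 ≤ r.length then acc ++ [r] else acc) []
  let t : List Int :=
    if runs = [] then []
    else
      let ss := PySem.List.sorted runs (fun x => (x.length : Int)) true
      PySem.List.sorted (ss.headD [] ++ ss.headD []) (fun x => x) false
  [t]

-- ===== PORT B =====
def find_l_d_alt (cards : List Int) : List (List Int) :=
  let counts := cards.foldl (fun d c => d.insert c (d.getD c 0 + 1)) (PySem.Dict.empty : PySem.Dict Int Int)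
  let s := PySem.List.sorted
      ((counts.items.filter (fun p => decide (2 ≤ p.2) && decide (p.1 < 15))).map (fun p => p.1))
      (fun x => x) false
  let bc := s.foldl (fun (bc : List Int × List Int) v =>
      let cur := if bc.2 ≠ [] ∧ PySem.List.pyGetD bc.2 (-1) 0 = v - 1 then bc.2 ++ [v] else [v]
      ((if 3 ≤ cur.length ∧ bc.1.length < cur.length then cur else bc.1), cur))
    (([] : List Int), ([] : List Int))
  [bc.1.flatMap (fun x => [x, x])]

-- ===== PRECONDITION & SPEC =====
def Spec_find_l_d (cards : List Int) (out : List (List Int)) : Prop := out = find_l_d_alt cards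
instance (cards : List Int) (out : List (List Int)) : Decidable (Spec_find_l_d cards out) := by unfold Spec_find_l_d; infer_instance

-- ===== CLAIM (what is proved, stated in full; the proofs are below) =====
def Claim_equal_find_l_d : Prop := ∀ (cards : List Int), Dom_find_l_d cards → Spec_find_l_d cards (find_l_d cards)

-- ===== LEMMAS AND PROOFS =====

-- proof-side step functions: "keep the first longest run" and B's scan step
def fmStep (b r : List Int) : List Int := if b.length < r.length then r else b
def step3 (b r : List Int) : List Int := if 3 ≤ r.length ∧ b.length < r.length then r else b
def bStep (bc : List Int × List Int) (v : Int) : List Int × List Int :=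
  let cur := if bc.2 ≠ [] ∧ PySem.List.pyGetD bc.2 (-1) 0 = v - 1 then bc.2 ++ [v] else [v]
  ((if 3 ≤ cur.length ∧ bc.1.length < cur.length then cur else bc.1), cur)

-- the successor chain relation of a "run"
def Succ (a b : Int) : Prop := b = a + 1

-- ---- the ordered-dedup loop of A ----
theorem dedup_fold_inv (p : Int → Prop) [DecidablePred p] :
    ∀ (l acc : List Int), acc.Nodup →
      (l.foldl (fun acc i => if p i then (if i ∉ acc then acc ++ [i] else acc) else acc) acc).Nodup ∧
      (∀ x, x ∈ l.foldl (fun acc i => if p i then (if i ∉ acc then acc ++ [i] else acc) else acc) acc ↔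
        x ∈ acc ∨ (p x ∧ x ∈ l)) := by
  intro l
  induction l with
  | nil => intro acc h; exact ⟨h, by simp⟩
  | cons i l ih =>
    intro acc h
    simp only [List.foldl_cons]
    by_cases hp : p i
    · by_cases hm : i ∈ acc
      · have H := ih acc h
        rw [if_pos hp, if_neg (by simpa using hm)]
        refine ⟨H.1, fun x => ?_⟩
        rw [H.2]
        simp only [List.mem_cons]
        by_cases hxi : x = i
        · subst hxi; tauto
        · tauto
      · have hnd : (acc ++ [i]).Nodup := by
          simp only [List.nodup_append, h, List.nodup_singleton, true_and]
          intro a ha b hb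
          simp only [List.mem_singleton] at hb
          subst hb
          intro rfl
          exact hm ha
        have H := ih (acc ++ [i]) hnd
        rw [if_pos hp, if_pos (by simpa using hm)]
        refine ⟨H.1, fun x => ?_⟩
        rw [H.2]
        simp only [List.mem_append, List.mem_cons]
        by_cases hxi : x = i
        · subst hxi; tauto
        · tauto
    · have H := ih acc h
      rw [if_neg hp]
      refine ⟨H.1, fun x => ?_⟩
      rw [H.2]
      simp only [List.mem_cons]
      by_cases hxi : x = i
      · subst hxi; tauto
      · tauto

theorem pairwise_lt_of_le_nodup (l : List Int) (h1 : l.Pairwise (· ≤ ·)) (h2 : l.Nodup) :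
    l.Pairwise (· < ·) := by
  have := List.Pairwise.and h1 (List.Pairwise.imp (fun h => h) h2)
  exact this.imp (fun ⟨hle, hne⟩ => lt_of_le_of_ne hle hne)

-- ---- runW basics ----
theorem runW_eq_nil (s : List Int) (v : Int) (h : ¬ (v ∈ s ∧ v < 15)) : runW s v = [] := by
  rw [runW]; simp [h]

theorem runW_cons (s : List Int) (v : Int) (h : v ∈ s ∧ v < 15) :
    runW s v = v :: runW s (v + 1) := by
  rw [runW]; simp [h]

theorem runW_congr (s s' : List Int) :
    ∀ (n : Nat) (v : Int), (15 - v).toNat ≤ n →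
      (∀ z, v ≤ z → z < 15 → (z ∈ s ↔ z ∈ s')) → runW s v = runW s' v := by
  intro n
  induction n with
  | zero =>
    intro v hn hmem
    have h15 : (15 : Int) ≤ v := by omega
    rw [runW_eq_nil _ _ (by omega), runW_eq_nil _ _ (by omega)]
  | succ n ih =>
    intro v hn hmem
    by_cases h : v ∈ s ∧ v < 15
    · have h' : v ∈ s' ∧ v < 15 := ⟨(hmem v le_rfl h.2).1 h.1, h.2⟩
      rw [runW_cons _ _ h, runW_cons _ _ h']
      rw [ih (v + 1) (by omega) (fun z hz h15 => hmem z (by omega) h15)]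
    · have h' : ¬ (v ∈ s' ∧ v < 15) := by
        intro hc
        exact h ⟨(hmem v le_rfl hc.2).2 hc.1, hc.2⟩
      rw [runW_eq_nil _ _ h, runW_eq_nil _ _ h']

theorem runW_chain (s : List Int) : ∀ (n : Nat) (v : Int), (15 - v).toNat ≤ n →
    List.IsChain Succ (runW s v) := by
  intro n
  induction n with
  | zero =>
    intro v hn
    rw [runW_eq_nil _ _ (by omega)]
    simp
  | succ n ih =>
    intro v hn
    by_cases h : v ∈ s ∧ v < 15
    · rw [runW_cons _ _ h]
      rw [List.isChain_cons]
      refine ⟨?_, ih (v + 1) (by omega)⟩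
      intro y hy
      by_cases h2 : v + 1 ∈ s ∧ v + 1 < 15
      · rw [runW_cons _ _ h2] at hy
        simp at hy
        simp [Succ, hy]
      · rw [runW_eq_nil _ _ h2] at hy
        simp at hy
    · rw [runW_eq_nil _ _ h]
      simp

theorem runW_drop (s : List Int) :
    ∀ (n : Nat) (v : Int), (15 - v).toNat ≤ n →
      ∀ i ∈ runW s v, ∃ k, runW s i = List.drop k (runW s v) ∧ (i ≠ v → 1 ≤ k) := by
  intro n
  induction n with
  | zero =>
    intro v hn i hi
    rw [runW_eq_nil _ _ (by omega)] at hi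
    simp at hi
  | succ n ih =>
    intro v hn i hi
    by_cases h : v ∈ s ∧ v < 15
    · rw [runW_cons _ _ h] at hi ⊢
      rcases List.mem_cons.1 hi with rfl | hi
      · exact ⟨0, by simp [runW_cons _ _ h], by simp⟩
      · obtain ⟨k, hk, _⟩ := ih (v + 1) (by omega) i hi
        exact ⟨k + 1, by simpa using hk, fun _ => by omega⟩
    · rw [runW_eq_nil _ _ h] at hi
      simp at hi

theorem getLastD_default_irrel : ∀ (l : List Int), l ≠ [] → ∀ (d d' : Int), l.getLastD d = l.getLastD d' := by
  intro l
  induction l with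
  | nil => intro h; exact absurd rfl h
  | cons y t ih =>
    intro _ d d'
    cases t with
    | nil => rfl
    | cons z t' => simp only [List.getLastD_cons]

-- ---- block decomposition of a strictly increasing list of values < 15 ----
theorem runW_block :
    ∀ (rest : List Int) (x : Int), (x :: rest).Pairwise (· < ·) → (∀ y ∈ x :: rest, y < 15) →
      ∃ t, x :: rest = runW (x :: rest) x ++ t ∧
        ∀ y ∈ t, (runW (x :: rest) x).getLastD 0 + 1 < y := by
  intro rest
  induction rest with
  | nil =>
    intro x _ h15
    have hx : x ∈ [x] ∧ x < 15 := ⟨List.mem_singleton_self x, h15 x (List.mem_singleton_self x)⟩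
    refine ⟨[], ?_, by simp⟩
    rw [runW_cons _ _ hx, runW_eq_nil _ (x + 1) (by simp only [List.mem_singleton]; omega)]
    simp
  | cons y r' ih =>
    intro x hpw h15
    have hxy : x < y := (List.pairwise_cons.1 hpw).1 y (List.mem_cons_self)
    have hx : x ∈ x :: y :: r' ∧ x < 15 := ⟨List.mem_cons_self, h15 x List.mem_cons_self⟩
    have hpw' : (y :: r').Pairwise (· < ·) := (List.pairwise_cons.1 hpw).2
    have h15' : ∀ z ∈ y :: r', z < 15 := fun z hz => h15 z (List.mem_cons_of_mem _ hz)
    by_cases hy : y = x + 1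
    · subst hy
      obtain ⟨t, ht, hgap⟩ := ih (x + 1) hpw' h15'
      have hcongr : runW (x :: (x + 1) :: r') (x + 1) = runW ((x + 1) :: r') (x + 1) := by
        apply runW_congr _ _ (15 - (x + 1)).toNat _ le_rfl
        intro z hz _
        simp only [List.mem_cons]
        constructor
        · rintro (rfl | hz') <;> [omega; exact hz']
        · exact fun hz' => Or.inr hz'
      have hrun : runW (x :: (x + 1) :: r') x = x :: runW ((x + 1) :: r') (x + 1) := by
        rw [runW_cons _ _ hx, hcongr]
      have hne : runW ((x + 1) :: r') (x + 1) ≠ [] := by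
        rw [runW_cons _ _ ⟨List.mem_cons_self, h15' (x + 1) List.mem_cons_self⟩]
        simp
      refine ⟨t, ?_, ?_⟩
      · rw [hrun]
        simpa using congrArg (fun l => x :: l) ht
      · intro z hz
        have := hgap z hz
        rw [hrun]
        have hh : (x :: runW ((x + 1) :: r') (x + 1)).getLastD 0
            = (runW ((x + 1) :: r') (x + 1)).getLastD 0 := by
          rw [List.getLastD_cons]
          exact getLastD_default_irrel _ hne _ _
        rw [hh]
        exact this
    · -- gap right after x : the run is [x]
      have hnotin : (x + 1) ∉ x :: y :: r' := by
        intro hc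
        rcases List.mem_cons.1 hc with hc1 | hc2
        · omega
        · rcases List.mem_cons.1 hc2 with hc3 | hc4
          · exact hy hc3.symm
          · have : y < x + 1 := (List.pairwise_cons.1 hpw').1 (x + 1) hc4
            omega
      have hrx : runW (x :: y :: r') x = [x] := by
        rw [runW_cons _ _ hx, runW_eq_nil _ (x + 1) (by simp [hnotin])]
      refine ⟨y :: r', by rw [hrx]; rfl, ?_⟩
      intro z hz
      rw [hrx]
      simp only [List.getLastD_cons, List.getLastD_nil]
      rcases List.mem_cons.1 hz with rfl | hz'
      · omega
      · have h1 : y < z := (List.pairwise_cons.1 hpw').1 z hz'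
        have h2 : z ≠ x + 1 := fun hc => hnotin (hc ▸ List.mem_cons_of_mem _ hz)
        omega

-- ---- generic fold helpers ----
theorem foldl_append_ite {α : Type} (p : α → Prop) [DecidablePred p] (f : α → List Int) :
    ∀ (l : List α) (acc : List (List Int)),
      l.foldl (fun acc x => if p x then acc ++ [f x] else acc) acc
        = acc ++ (l.filter (fun x => decide (p x))).map f := by
  intro l
  induction l with
  | nil => intro acc; simp
  | cons x l ih =>
    intro acc
    simp only [List.foldl_cons, List.filter_cons]
    by_cases hx : p x
    · rw [if_pos hx, ih]
      simp [hx]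
    · rw [if_neg hx, ih]
      simp [hx]

theorem foldl_fmStep_const : ∀ (rs : List (List Int)) (b : List Int),
    (∀ r ∈ rs, r.length ≤ b.length) → rs.foldl fmStep b = b := by
  intro rs
  induction rs with
  | nil => intro b _; rfl
  | cons r rs ih =>
    intro b hb
    simp only [List.foldl_cons]
    have h1 : fmStep b r = b := by
      unfold fmStep
      rw [if_neg (by have := hb r List.mem_cons_self; omega)]
    rw [h1]
    exact ih b (fun r hr => hb r (List.mem_cons_of_mem _ hr))

theorem foldl_fmStep_pred (P : List Int → Prop) :
    ∀ (rs : List (List Int)) (b : List Int), P b → (∀ r ∈ rs, P r) → P (rs.foldl fmStep b) := by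
  intro rs
  induction rs with
  | nil => intro b hb _; exact hb
  | cons r rs ih =>
    intro b hb h
    simp only [List.foldl_cons]
    apply ih
    · unfold fmStep
      split
      · exact h r List.mem_cons_self
      · exact hb
    · exact fun r hr => h r (List.mem_cons_of_mem _ hr)

-- more getLast/chain helpers
theorem getLastD_append_singleton : ∀ (l : List Int) (a d : Int), (l ++ [a]).getLastD d = a := by
  intro l
  induction l with
  | nil => intro a d; simp
  | cons x t ih =>
    intro a d
    rw [List.cons_append, List.getLastD_cons]
    exact ih a x

theorem pyGetD_neg_one_getLastD (p : List Int) (hp : p ≠ []) :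
    PySem.List.pyGetD p (-1) 0 = p.getLastD 0 := by
  rw [PySem.List.pyGetD_neg_one p 0 hp]
  cases p with
  | nil => exact absurd rfl hp
  | cons x t =>
    rw [List.getLast_eq_getLastD, List.getLastD_cons]

theorem chain_head_le : ∀ (l : List Int) (a : Int), List.IsChain Succ (a :: l) →
    ∀ y ∈ l, a ≤ y := by
  intro l
  induction l with
  | nil => intro a _ y hy; simp at hy
  | cons b l' ih =>
    intro a hch y hy
    have hab : Succ a b := (List.isChain_cons_cons.1 hch).1
    unfold Succ at hab
    have hch' := (List.isChain_cons_cons.1 hch).2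
    rcases List.mem_cons.1 hy with rfl | hy'
    · omega
    · have := ih b hch' y hy'
      omega

theorem runW_ge (s : List Int) : ∀ (n : Nat) (v : Int), (15 - v).toNat ≤ n →
    ∀ y ∈ runW s v, v ≤ y := by
  intro n
  induction n with
  | zero =>
    intro v hn y hy
    rw [runW_eq_nil _ _ (by omega)] at hy
    simp at hy
  | succ n ih =>
    intro v hn y hy
    by_cases h : v ∈ s ∧ v < 15
    · rw [runW_cons _ _ h] at hy
      rcases List.mem_cons.1 hy with rfl | hy'
      · omega
      · have := ih (v + 1) (by omega) y hy'
        omega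
    · rw [runW_eq_nil _ _ h] at hy
      simp at hy

-- ---- A's per-block contribution ----
theorem Ablock (s : List Int) (x : Int) (b : List Int) (hne : runW s x ≠ []) :
    (((runW s x).filter (fun i => decide (3 ≤ (runW s i).length))).map (runW s)).foldl fmStep b
      = step3 b (runW s x) := by
  have hx : x ∈ s ∧ x < 15 := by
    by_contra hc
    exact hne (runW_eq_nil _ _ hc)
  have hcons : runW s x = x :: runW s (x + 1) := runW_cons _ _ hx
  have hdrop := runW_drop s (15 - x).toNat x le_rfl
  have hlen : ∀ i ∈ runW s x, (runW s i).length ≤ (runW s x).length ∧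
      (i ≠ x → (runW s i).length + 1 ≤ (runW s x).length) := by
    intro i hi
    obtain ⟨k, hk, hk1⟩ := hdrop i hi
    constructor
    · rw [hk, List.length_drop]; omega
    · intro hne'
      have := hk1 hne'
      have hlt : (runW s x).length ≠ 0 := by
        intro hc
        rw [List.length_eq_zero_iff] at hc
        exact hne hc
      rw [hk, List.length_drop]; omega
  by_cases h3 : 3 ≤ (runW s x).length
  · -- the full block passes the filter first; later runs are strictly shorter
    have hqx : decide (3 ≤ (runW s x).length) = true := by simpa using h3
    have hfilter : (runW s x).filter (fun i => decide (3 ≤ (runW s i).length))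
        = x :: (runW s (x + 1)).filter (fun i => decide (3 ≤ (runW s i).length)) := by
      conv_lhs => rw [hcons]
      rw [List.filter_cons, if_pos hqx]
    rw [hfilter]
    simp only [List.map_cons, List.foldl_cons]
    have hstep : fmStep b (runW s x) = step3 b (runW s x) := by
      unfold fmStep step3
      by_cases hb : b.length < (runW s x).length
      · rw [if_pos hb, if_pos ⟨h3, hb⟩]
      · rw [if_neg hb, if_neg (fun hc => hb hc.2)]
    rw [hstep]
    apply foldl_fmStep_const
    intro r hr
    simp only [List.mem_map, List.mem_filter] at hr
    obtain ⟨i, ⟨hi, _⟩, rfl⟩ := hr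
    have hix : i ∈ runW s x := by rw [hcons]; exact List.mem_cons_of_mem _ hi
    have hineq : i ≠ x := by
      have hge := runW_ge s (15 - (x + 1)).toNat (x + 1) le_rfl i hi
      omega
    have h2 := (hlen i hix).2 hineq
    have hst : (runW s x).length ≤ (step3 b (runW s x)).length := by
      unfold step3
      split
      · omega
      · omega
    omega
  · have hfilter : (runW s x).filter (fun i => decide (3 ≤ (runW s i).length)) = [] := by
      apply List.filter_eq_nil_iff.2
      intro i hi
      have := (hlen i hi).1
      simp only [decide_eq_true_eq]
      omega
    rw [hfilter]
    unfold step3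
    rw [if_neg (fun hc => h3 hc.1)]
    rfl

-- ---- B's scan over one block ----
theorem Bscan : ∀ (c p b : List Int), p ≠ [] →
    (∀ y ∈ c.head?, y = p.getLastD 0 + 1) → List.IsChain Succ c →
    c.foldl bStep (b, p)
      = ((if 3 ≤ (p ++ c).length ∧ b.length < (p ++ c).length ∧ p.length < (p ++ c).length
          then p ++ c else b), p ++ c) := by
  intro c
  induction c with
  | nil =>
    intro p b hp _ _
    simp
  | cons v c' ih =>
    intro p b hp hhead hch
    have hv : v = p.getLastD 0 + 1 := hhead v rfl
    have hlast : PySem.List.pyGetD p (-1) 0 = p.getLastD 0 := pyGetD_neg_one_getLastD p hp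
    have hcur : (if p ≠ [] ∧ PySem.List.pyGetD p (-1) 0 = v - 1 then p ++ [v] else [v]) = p ++ [v] := by
      rw [if_pos ⟨hp, by rw [hlast]; omega⟩]
    have hstep : bStep (b, p) v
        = ((if 3 ≤ (p ++ [v]).length ∧ b.length < (p ++ [v]).length then p ++ [v] else b), p ++ [v]) := by
      unfold bStep
      simp only [hcur]
    have hch' : List.IsChain Succ c' := (List.isChain_cons.1 hch).2
    have hhead' : ∀ y ∈ c'.head?, y = (p ++ [v]).getLastD 0 + 1 := by
      intro y hy
      have hs : Succ v y := by
        cases c' with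
        | nil => simp at hy
        | cons w c'' =>
          simp only [List.head?_cons, Option.mem_some_iff] at hy
          subst hy
          exact (List.isChain_cons_cons.1 hch).1
      rw [getLastD_append_singleton]
      exact hs
    simp only [List.foldl_cons, hstep]
    rw [ih (p ++ [v]) _ (by simp) hhead' hch']
    have hT : (p ++ [v]) ++ c' = p ++ v :: c' := by simp
    rw [hT]
    simp only [Prod.mk.injEq, and_true]
    cases c' with
    | nil =>
      by_cases h1 : 3 ≤ (p ++ [v]).length ∧ b.length < (p ++ [v]).length
      · rw [if_pos h1]
        simp only [List.length_append, List.length_cons, List.length_nil] at h1 ⊢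
        split_ifs <;> first | rfl | (exfalso; omega)
      · rw [if_neg h1]
        simp only [List.length_append, List.length_cons, List.length_nil, not_and, not_lt] at h1 ⊢
        split_ifs <;> first | rfl | (exfalso; omega)
    | cons w c'' =>
      by_cases h1 : 3 ≤ (p ++ [v]).length ∧ b.length < (p ++ [v]).length
      · rw [if_pos h1]
        simp only [List.length_append, List.length_cons, List.length_nil] at h1 ⊢
        split_ifs <;> first | rfl | (exfalso; omega)
      · rw [if_neg h1]
        simp only [List.length_append, List.length_cons, List.length_nil, not_and, not_lt] at h1 ⊢
        split_ifs <;> first | rfl | (exfalso; omega)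

theorem Bblock (c₀ p b : List Int) (hne : c₀ ≠ []) (hch : List.IsChain Succ c₀)
    (hnm : p = [] ∨ ∀ y ∈ c₀.head?, p.getLastD 0 ≠ y - 1) :
    c₀.foldl bStep (b, p) = (step3 b c₀, c₀) := by
  cases c₀ with
  | nil => exact absurd rfl hne
  | cons x c₁ =>
    have hcur : (if p ≠ [] ∧ PySem.List.pyGetD p (-1) 0 = x - 1 then p ++ [x] else [x]) = [x] := by
      rw [if_neg]
      rintro ⟨hp, hc⟩
      rcases hnm with rfl | h
      · exact hp rfl
      · rw [pyGetD_neg_one_getLastD p hp] at hc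
        exact (h x rfl) hc
    have hstep : bStep (b, p) x = (b, [x]) := by
      unfold bStep
      simp only [hcur]
      norm_num
    simp only [List.foldl_cons, hstep]
    have hhead1 : ∀ y ∈ c₁.head?, y = ([x] : List Int).getLastD 0 + 1 := by
      intro y hy
      have hs : Succ x y := by
        cases c₁ with
        | nil => simp at hy
        | cons w c'' =>
          simp only [List.head?_cons, Option.mem_some_iff] at hy
          subst hy
          exact (List.isChain_cons_cons.1 hch).1
      simpa [List.getLastD_cons, List.getLastD_nil] using hs
    rw [Bscan c₁ [x] b (by simp) hhead1 (List.isChain_cons.1 hch).2]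
    have hx : ([x] : List Int) ++ c₁ = x :: c₁ := rfl
    rw [hx]
    simp only [Prod.mk.injEq, and_true]
    unfold step3
    cases c₁ with
    | nil =>
      simp only [List.length_cons, List.length_nil]
      split_ifs <;> first | rfl | (exfalso; omega)
    | cons w c'' =>
      simp only [List.length_cons, List.length_nil]
      split_ifs <;> first | rfl | (exfalso; omega)

-- ---- the main induction: first-longest over A's run list = B's scan ----
theorem main_ind : ∀ (n : Nat) (s : List Int), s.length ≤ n → s.Pairwise (· < ·) →
    (∀ y ∈ s, y < 15) →
    ∀ (b p : List Int), (p = [] ∨ ∀ y ∈ s.head?, p.getLastD 0 ≠ y - 1) →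
      ((s.filter (fun i => decide (3 ≤ (runW s i).length))).map (runW s)).foldl fmStep b
        = (s.foldl bStep (b, p)).1 := by
  intro n
  induction n with
  | zero =>
    intro s hn _ _ b p _
    have hs : s = [] := List.length_eq_zero_iff.1 (Nat.le_zero.1 hn)
    subst hs
    rfl
  | succ n ih =>
    intro s hn hpw h15 b p hnm
    cases s with
    | nil => rfl
    | cons x rest =>
      obtain ⟨t, ht, hgap⟩ := runW_block rest x hpw h15
      have hxmem : x ∈ x :: rest ∧ x < 15 := ⟨List.mem_cons_self, h15 x List.mem_cons_self⟩
      have hc0cons : runW (x :: rest) x = x :: runW (x :: rest) (x + 1) := runW_cons _ _ hxmem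
      have hc0ne : runW (x :: rest) x ≠ [] := by rw [hc0cons]; simp
      have hchain : List.IsChain Succ (runW (x :: rest) x) := runW_chain _ (15 - x).toNat x le_rfl
      have hpwappend : (runW (x :: rest) x ++ t).Pairwise (· < ·) := by rw [← ht]; exact hpw
      have h15t : ∀ y ∈ t, y < 15 := fun y hy => h15 y (by rw [ht]; exact List.mem_append_right _ hy)
      have hpwt : t.Pairwise (· < ·) := (List.pairwise_append.1 hpwappend).2.1
      have hc0lt : ∀ y ∈ runW (x :: rest) x, ∀ z ∈ t, y < z := (List.pairwise_append.1 hpwappend).2.2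
      have hrt : ∀ i ∈ t, runW (x :: rest) i = runW t i := by
        intro i hi
        apply runW_congr _ _ (15 - i).toNat i le_rfl
        intro z hz _
        rw [ht]
        simp only [List.mem_append]
        constructor
        · rintro (hzc | hzt)
          · exact absurd (hc0lt z hzc i hi) (by omega)
          · exact hzt
        · exact fun hzt => Or.inr hzt
      have hfa := congrArg
        (fun l => ((l.filter (fun i => decide (3 ≤ (runW (x :: rest) i).length))).map
          (runW (x :: rest))).foldl fmStep b) ht
      simp only [List.filter_append, List.map_append, List.foldl_append] at hfa
      have htconv : (t.filter (fun i => decide (3 ≤ (runW (x :: rest) i).length))).map (runW (x :: rest))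
          = (t.filter (fun i => decide (3 ≤ (runW t i).length))).map (runW t) := by
        rw [List.filter_congr (fun i hi => by rw [hrt i hi])]
        apply List.map_congr_left
        intro i hi
        exact hrt i (List.mem_filter.1 hi).1
      have hlent : t.length ≤ n := by
        have hlen := congrArg List.length ht
        simp only [List.length_append, List.length_cons] at hlen
        have hc1 : 1 ≤ (runW (x :: rest) x).length := by
          rw [hc0cons]
          simp
        simp only [List.length_cons] at hn
        omega
      have hnm' : runW (x :: rest) x = [] ∨
          ∀ y ∈ t.head?, (runW (x :: rest) x).getLastD 0 ≠ y - 1 := by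
        right
        intro y hy
        have hyt : y ∈ t := List.mem_of_mem_head? hy
        have := hgap y hyt
        omega
      have hB : (x :: rest).foldl bStep (b, p) = t.foldl bStep (step3 b (runW (x :: rest) x), runW (x :: rest) x) := by
        have hnmB : p = [] ∨ ∀ y ∈ (runW (x :: rest) x).head?, p.getLastD 0 ≠ y - 1 := by
          rcases hnm with rfl | h
          · exact Or.inl rfl
          · right
            intro y hy
            rw [hc0cons] at hy
            simp only [List.head?_cons, Option.mem_some_iff] at hy
            subst hy
            exact h x rfl
        conv_lhs => rw [ht]
        rw [List.foldl_append, Bblock _ p b hc0ne hchain hnmB]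
      rw [hfa, Ablock _ x b hc0ne, htconv,
        ih t hlent hpwt h15t (step3 b (runW (x :: rest) x)) (runW (x :: rest) x) hnm', hB]

-- ---- head of Python's stable reverse sort by length = first longest ----
theorem head_foldl_insertBy :
    ∀ (l : List (List Int)) (r : List Int) (acc : List (List Int)),
      ((l.foldl (fun acc x =>
          PySem.List.insertBy (fun a b => decide ((b.length : Int) < (a.length : Int))) x acc)
        (r :: acc)).headD []) = l.foldl fmStep r := by
  intro l
  induction l with
  | nil => intro r acc; simp
  | cons x l ih =>
    intro r acc
    simp only [List.foldl_cons]
    by_cases h : r.length < x.length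
    · have he : PySem.List.insertBy (fun a b => decide ((b.length : Int) < (a.length : Int))) x (r :: acc)
          = x :: r :: acc := by
        simp [PySem.List.insertBy, h]
      rw [he, ih]
      have hf : fmStep r x = x := by unfold fmStep; rw [if_pos h]
      rw [hf]
    · have he : PySem.List.insertBy (fun a b => decide ((b.length : Int) < (a.length : Int))) x (r :: acc)
          = r :: PySem.List.insertBy (fun a b => decide ((b.length : Int) < (a.length : Int))) x acc := by
        simp [PySem.List.insertBy, h]
      rw [he, ih]
      have hf : fmStep r x = r := by unfold fmStep; rw [if_neg h]
      rw [hf]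

theorem head_sorted_rev_len (r0 : List Int) (rest : List (List Int)) (h0 : 1 ≤ r0.length) :
    (PySem.List.sorted (r0 :: rest) (fun x => (x.length : Int)) true).headD []
      = (r0 :: rest).foldl fmStep [] := by
  rw [PySem.List.sorted_rev_eq_foldl_insertBy]
  simp only [List.foldl_cons]
  have h1 : PySem.List.insertBy (fun a b => decide (((b.length : Int)) < ((a.length : Int)))) r0 [] = [r0] := by
    simp [PySem.List.insertBy]
  rw [h1, head_foldl_insertBy rest r0 []]
  have hf : fmStep [] r0 = r0 := by
    unfold fmStep
    rw [if_pos (by simpa using h0)]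
  rw [hf]

-- ---- doubling a run ----
theorem chain_succ_pairwise : ∀ (h : List Int), List.IsChain Succ h → h.Pairwise (· ≤ ·) := by
  intro l
  induction l with
  | nil => intro _; simp
  | cons a t ih =>
    intro hch
    rw [List.pairwise_cons]
    exact ⟨chain_head_le t a hch, ih (List.isChain_cons.1 hch).2⟩

theorem double_perm : ∀ (h : List Int), (h ++ h).Perm (h.flatMap fun x => [x, x]) := by
  intro l
  induction l with
  | nil => simp
  | cons x t ih =>
    simp only [List.flatMap_cons, List.cons_append]
    refine List.Perm.cons x ?_
    exact List.perm_middle.trans (List.Perm.cons x ih)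

theorem double_pairwise : ∀ (h : List Int), h.Pairwise (· ≤ ·) →
    (h.flatMap fun x => [x, x]).Pairwise (· ≤ ·) := by
  intro l
  induction l with
  | nil => intro _; simp
  | cons a t ih =>
    intro hpw
    rw [List.pairwise_cons] at hpw
    simp only [List.flatMap_cons, List.cons_append, List.nil_append]
    rw [List.pairwise_cons]
    constructor
    · intro y hy
      rcases List.mem_cons.1 hy with rfl | hy'
      · exact le_refl y
      · obtain ⟨z, hz, hyz⟩ := List.mem_flatMap.1 hy'
        have hyz' : y = z := by
          rcases List.mem_cons.1 hyz with rfl | h2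
          · rfl
          · simpa using h2
        subst hyz'
        exact hpw.1 y hz
    · rw [List.pairwise_cons]
      constructor
      · intro y hy
        obtain ⟨z, hz, hyz⟩ := List.mem_flatMap.1 hy
        have hyz' : y = z := by
          rcases List.mem_cons.1 hyz with rfl | h2
          · rfl
          · simpa using h2
        subst hyz'
        exact hpw.1 y hz
      · exact ih hpw.2

theorem sorted_double (h : List Int) (hpw : h.Pairwise (· ≤ ·)) :
    PySem.List.sorted (h ++ h) (fun x => x) false = h.flatMap fun x => [x, x] := by
  exact PySem.List.sorted_id_eq_of_perm_of_pairwise _ _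
    (double_perm h).symm (double_pairwise h hpw)

-- ===== VERDICT (by name: the statement is the Claim_ definition above) =====
theorem tail_glue (Q : List Int) (hQlt : Q.Pairwise (· < ·)) (hQ15 : ∀ y ∈ Q, y < 15) :
    (if (Q.filter (fun i => decide (3 ≤ (runW Q i).length))).map (runW Q) = [] then []
     else
       PySem.List.sorted
         (((PySem.List.sorted ((Q.filter (fun i => decide (3 ≤ (runW Q i).length))).map (runW Q))
             (fun x => (x.length : Int)) true).headD []) ++
          ((PySem.List.sorted ((Q.filter (fun i => decide (3 ≤ (runW Q i).length))).map (runW Q))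
             (fun x => (x.length : Int)) true).headD []))
         (fun x => x) false)
    = List.flatMap (fun x => [x, x]) (Q.foldl bStep (([] : List Int), ([] : List Int))).1 := by
  have hmain := main_ind Q.length Q le_rfl hQlt hQ15 [] [] (Or.inl rfl)
  set runs := (Q.filter (fun i => decide (3 ≤ (runW Q i).length))).map (runW Q) with hruns
  have h3runs : ∀ r ∈ runs, 3 ≤ r.length := by
    intro r hr
    rw [hruns] at hr
    obtain ⟨i, hi, rfl⟩ := List.mem_map.1 hr
    have := (List.mem_filter.1 hi).2
    simpa using this
  have hchainruns : ∀ r ∈ runs, List.IsChain Succ r := by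
    intro r hr
    rw [hruns] at hr
    obtain ⟨i, _, rfl⟩ := List.mem_map.1 hr
    exact runW_chain Q (15 - i).toNat i le_rfl
  have hFMchain : List.IsChain Succ (runs.foldl fmStep []) :=
    foldl_fmStep_pred (List.IsChain Succ) runs [] (by simp) hchainruns
  by_cases hrn : runs = []
  · rw [if_pos hrn]
    rw [hrn] at hmain
    simp only [List.foldl_nil] at hmain
    rw [← hmain]
    simp
  · rw [if_neg hrn]
    obtain ⟨r0, rest, hr0⟩ : ∃ r0 rest, runs = r0 :: rest := by
      cases hh : runs with
      | nil => exact absurd hh hrn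
      | cons a b => exact ⟨a, b, rfl⟩
    have h0 : 1 ≤ r0.length := by
      have := h3runs r0 (by rw [hr0]; exact List.mem_cons_self)
      omega
    have hhead : (PySem.List.sorted runs (fun x => (x.length : Int)) true).headD []
        = runs.foldl fmStep [] := by
      rw [hr0]
      exact head_sorted_rev_len r0 rest h0
    rw [hhead, hmain]
    rw [sorted_double _ (chain_succ_pairwise _ (hmain ▸ hFMchain))]

-- ===== VERDICT (by name: the statement is the Claim_ definition above) =====
theorem find_l_d_spec : Claim_equal_find_l_d := by
  intro cards _
  unfold Spec_find_l_d
  simp only [find_l_d, find_l_d_alt]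
  -- ---- characterise A's duplicate list and its sort ----
  have hded := dedup_fold_inv (fun i => 2 ≤ PySem.List.count cards i) cards [] List.nodup_nil
  set t2 := cards.foldl (fun acc i =>
      if 2 ≤ PySem.List.count cards i then (if i ∉ acc then acc ++ [i] else acc) else acc) [] with ht2
  set P := PySem.List.sorted t2 (fun x => x) false with hP
  have ht2mem : ∀ x, x ∈ t2 ↔ 2 ≤ PySem.List.count cards x ∧ x ∈ cards := by
    intro x
    rw [hded.2 x]
    simp
  have hPnodup : P.Nodup := ((PySem.List.sorted_perm t2 (fun x => x) false).nodup_iff).2 hded.1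
  have hPle : P.Pairwise (· ≤ ·) := PySem.List.sorted_pairwise t2 (fun x => x)
  have hPlt : P.Pairwise (· < ·) := pairwise_lt_of_le_nodup P hPle hPnodup
  have hPmem : ∀ x, x ∈ P ↔ 2 ≤ PySem.List.count cards x ∧ x ∈ cards := by
    intro x
    rw [PySem.List.mem_sorted]
    exact ht2mem x
  -- ---- characterise B's sorted candidate list ----
  simp only [PySem.Dict.foldl_insert_getD_add_one_eq_counter, PySem.Dict.items_counter,
    List.filter_map, List.map_map]
  have hcomp :
      ((PySem.Set.ofList cards).filter
          ((fun p => decide (2 ≤ p.2) && decide (p.1 < 15)) ∘ fun k => (k, (List.count k cards : Int)))).map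
        ((fun p => p.1) ∘ fun k => (k, (List.count k cards : Int)))
      = (PySem.Set.ofList cards).filter
          (fun k => decide (2 ≤ (List.count k cards : Int)) && decide (k < 15)) := by
    simp [Function.comp_def]
  rw [hcomp]
  have hQ : PySem.List.sorted
      ((PySem.Set.ofList cards).filter (fun k => decide (2 ≤ (List.count k cards : Int)) && decide (k < 15)))
      (fun x => x) false = P.filter (fun x => decide (x < 15)) := by
    apply PySem.List.sorted_eq_of_perm_of_pairwise_lt
    · apply (List.perm_ext_iff_of_nodup (hPnodup.filter _)
        ((PySem.Set.nodup_ofList cards).filter _)).2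
      intro a
      simp only [List.mem_filter, hPmem a, PySem.Set.mem_ofList, PySem.List.count_eq,
        Bool.and_eq_true, decide_eq_true_eq]
      constructor
      · rintro ⟨⟨hc, hm⟩, h15⟩
        exact ⟨hm, by exact_mod_cast hc, h15⟩
      · rintro ⟨hm, hc, h15⟩
        exact ⟨⟨by exact_mod_cast hc, hm⟩, h15⟩
    · exact hPlt.filter _
  rw [hQ]
  -- ---- convert A's run-collecting loop to run over the filtered list ----
  set Q := P.filter (fun x => decide (x < 15)) with hQdef
  have hQ15 : ∀ y ∈ Q, y < 15 := by
    intro y hy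
    have := (List.mem_filter.1 hy).2
    simpa using this
  have hQlt : Q.Pairwise (· < ·) := hPlt.filter _
  have hQmem : ∀ z, z < 15 → (z ∈ P ↔ z ∈ Q) := by
    intro z hz
    rw [hQdef, List.mem_filter]
    simp [hz]
  have hrPQ : ∀ i, runW P i = runW Q i := by
    intro i
    apply runW_congr _ _ (15 - i).toNat i le_rfl
    intro z _ hz15
    exact hQmem z hz15
  simp only [hrPQ]
  rw [foldl_append_ite (fun i => 3 ≤ (runW Q i).length) (fun i => runW Q i) P []]
  simp only [List.nil_append]
  have hq15 : ∀ i, decide (3 ≤ (runW Q i).length) = true → i < 15 := by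
    intro i hi
    by_contra hc
    rw [runW_eq_nil Q i (by intro h; exact hc h.2)] at hi
    simp at hi
  have hfPQ : P.filter (fun i => decide (3 ≤ (runW Q i).length))
      = Q.filter (fun i => decide (3 ≤ (runW Q i).length)) := by
    rw [hQdef, List.filter_filter]
    apply List.filter_congr
    intro i _
    by_cases hdi : decide (3 ≤ (runW Q i).length) = true
    · rw [hdi]
      simp [hq15 i hdi]
    · simp only [Bool.not_eq_true] at hdi
      rw [hdi]
      simp
  rw [hfPQ]
  -- ---- conclude via the generic tail lemma ----
  have hbStep : (fun (bc : List Int × List Int) v =>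
      ((if 3 ≤ (if bc.2 ≠ [] ∧ PySem.List.pyGetD bc.2 (-1) 0 = v - 1 then bc.2 ++ [v] else [v]).length ∧
          bc.1.length < (if bc.2 ≠ [] ∧ PySem.List.pyGetD bc.2 (-1) 0 = v - 1 then bc.2 ++ [v] else [v]).length
        then (if bc.2 ≠ [] ∧ PySem.List.pyGetD bc.2 (-1) 0 = v - 1 then bc.2 ++ [v] else [v]) else bc.1),
       (if bc.2 ≠ [] ∧ PySem.List.pyGetD bc.2 (-1) 0 = v - 1 then bc.2 ++ [v] else [v]))) = bStep := rfl
  rw [hbStep]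
  exact congrArg (fun t => [t]) (tail_glue Q hQlt hQ15)
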